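-- pv_equiv track=rewrite | github.com/Maxonman/Tarea-Python | Formatter.py | formatear_codigo2
-- ===== SOURCE A (Python) =====
-- def formatear_codigo2(codigo, config):
--     espacios, saltos_de_linea, tabs = config
--     indentacion = 0
--     linea = []
--     final = []
--     for lineas in codigo:
--         if("{" in lineas):
--             lineas = "\t"*indentacion+lineas
--             final.append(lineas)
--             indentacion += 1
--         elif("}" in lineas):
--             indentacion -= 1
--             lineas = "\t"*indentacion+lineas
--             final.append(lineas)
--         else:
--             lineas = "\t"*indentacion+lineas
--             final.append(lineas)
--     return "\n".join(final)
-- ===== SOURCE B (Python) =====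
-- def formatear_codigo2(codigo, config):
--     espacios, saltos_de_linea, tabs = config
--     deltas = [1 if "{" in l else -1 if "}" in l else 0 for l in codigo]
--     prefixes = [0]
--     for d in deltas:
--         prefixes.append(prefixes[-1] + d)
--     return "\n".join("\t" * (p + min(d, 0)) + l
--                      for p, d, l in zip(prefixes, deltas, codigo))
-- ===== Notes on version B (the rewrite author's own statement) =====
-- stated objective: alternative
-- what changed: Replaces the single stateful loop with three-branch appends by a delta table, a prefix-sum pass, and one uniform zip/format pass (indent = prefix + min(delta,0), no branches in the formatting step).
import Mathlib
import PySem

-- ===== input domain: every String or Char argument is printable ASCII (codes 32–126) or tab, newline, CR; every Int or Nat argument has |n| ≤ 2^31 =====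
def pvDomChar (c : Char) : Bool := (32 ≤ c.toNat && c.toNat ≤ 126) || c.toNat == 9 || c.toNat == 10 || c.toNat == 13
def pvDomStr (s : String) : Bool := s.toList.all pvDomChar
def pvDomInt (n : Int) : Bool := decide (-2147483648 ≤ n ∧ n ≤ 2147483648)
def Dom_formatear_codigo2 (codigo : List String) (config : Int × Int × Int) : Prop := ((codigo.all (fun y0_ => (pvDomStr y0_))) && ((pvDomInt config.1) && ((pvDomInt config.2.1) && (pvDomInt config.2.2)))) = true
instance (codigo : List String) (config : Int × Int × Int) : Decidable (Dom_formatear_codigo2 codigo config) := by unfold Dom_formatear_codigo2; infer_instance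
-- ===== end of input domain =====

-- B replaces A's stateful three-branch loop by a delta table, a prefix-sum pass and one uniform formatting pass (alternative decomposition, same cost).


-- "\t"*n for a Python int n (negative → empty string), shared by both ports
def pvTabs (n : Int) : String := String.mk (List.replicate n.toNat '\t')

-- ===== PORT A =====
-- the for-loop: state = (indentacion, final), branches in A's order
def fmtLoopA : List String → Int → List String → List String
  | [], _, final => final
  | l :: rest, ind, final =>
    if PySem.Str.isIn "{" l then
      fmtLoopA rest (ind + 1) (final ++ [pvTabs ind ++ l])
    else if PySem.Str.isIn "}" l then
      fmtLoopA rest (ind - 1) (final ++ [pvTabs (ind - 1) ++ l])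
    else
      fmtLoopA rest ind (final ++ [pvTabs ind ++ l])

def formatear_codigo2 (codigo : List String) (config : Int × Int × Int) : String :=
  -- espacios, saltos_de_linea, tabs are unpacked but unused
  PySem.Str.join "\n" (fmtLoopA codigo 0 [])

-- ===== PORT B =====
def deltaB (l : String) : Int :=
  if PySem.Str.isIn "{" l then 1 else if PySem.Str.isIn "}" l then -1 else 0

def formatear_codigo2_alt (codigo : List String) (config : Int × Int × Int) : String :=
  let deltas := codigo.map deltaB
  let prefixes := deltas.foldl (fun acc d => acc ++ [acc.getLastD 0 + d]) [0]
  PySem.Str.join "\n" ((prefixes.zip (deltas.zip codigo)).map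
    (fun pdl => pvTabs (pdl.1 + min pdl.2.1 0) ++ pdl.2.2))

-- ===== PRECONDITION & SPEC =====
def Spec_formatear_codigo2 (codigo : List String) (config : Int × Int × Int) (out : String) : Prop := out = formatear_codigo2_alt codigo config
instance (codigo : List String) (config : Int × Int × Int) (out : String) : Decidable (Spec_formatear_codigo2 codigo config out) := by unfold Spec_formatear_codigo2; infer_instance

-- ===== CLAIM (what is proved, stated in full; the proofs are below) =====
def Claim_equal_formatear_codigo2 : Prop := ∀ (codigo : List String) (config : Int × Int × Int), Dom_formatear_codigo2 codigo config → Spec_formatear_codigo2 codigo config (formatear_codigo2 codigo config)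

-- ===== LEMMAS AND PROOFS =====

-- running prefix sums starting after p
def scanB : List Int → Int → List Int
  | [], _ => []
  | d :: ds, p => (p + d) :: scanB ds (p + d)

theorem foldl_prefixes (ds : List Int) (acc : List Int) (p : Int)
    (h : acc.getLastD 0 = p) :
    ds.foldl (fun acc d => acc ++ [acc.getLastD 0 + d]) acc = acc ++ scanB ds p := by
  induction ds generalizing acc p with
  | nil => simp [scanB]
  | cons d ds ih =>
    simp only [List.foldl_cons, scanB]
    rw [ih (acc ++ [acc.getLastD 0 + d]) (p + d) (by rw [List.getLastD_concat, h]), h]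
    simp

-- the formatted body produced from nesting level ind, B's shape
def bodyAt (codigo : List String) (ind : Int) : List String :=
  ((ind :: scanB (codigo.map deltaB) ind).zip ((codigo.map deltaB).zip codigo)).map
    (fun pdl => pvTabs (pdl.1 + min pdl.2.1 0) ++ pdl.2.2)

theorem bodyAt_cons (l : String) (rest : List String) (ind : Int) :
    bodyAt (l :: rest) ind
      = (pvTabs (ind + min (deltaB l) 0) ++ l) :: bodyAt rest (ind + deltaB l) := by
  simp [bodyAt, scanB]

theorem fmtLoopA_eq_bodyAt (codigo : List String) (ind : Int) (final : List String) :
    fmtLoopA codigo ind final = final ++ bodyAt codigo ind := by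
  induction codigo generalizing ind final with
  | nil => simp [fmtLoopA, bodyAt, scanB]
  | cons l rest ih =>
    rw [bodyAt_cons]
    unfold fmtLoopA
    split_ifs with h1 h2
    · have hd : deltaB l = 1 := by unfold deltaB; rw [if_pos h1]
      rw [ih, hd]
      have h0 : ind + min (1 : Int) 0 = ind := by omega
      rw [h0]; simp
    · have hd : deltaB l = -1 := by unfold deltaB; rw [if_neg h1, if_pos h2]
      rw [ih, hd]
      have h0 : ind + min (-1 : Int) 0 = ind - 1 := by omega
      have h0' : ind + (-1 : Int) = ind - 1 := by omega
      rw [h0, h0']; simp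
    · have hd : deltaB l = 0 := by unfold deltaB; rw [if_neg h1, if_neg h2]
      rw [ih, hd]
      have h0 : ind + min (0 : Int) 0 = ind := by omega
      rw [h0]; simp

-- ===== VERDICT (by name: the statement is the Claim_ definition above) =====
theorem formatear_codigo2_spec : Claim_equal_formatear_codigo2 := by
  intro codigo config _
  show PySem.Str.join "\n" (fmtLoopA codigo 0 []) =
    PySem.Str.join "\n"
      ((((codigo.map deltaB).foldl (fun acc d => acc ++ [acc.getLastD 0 + d]) [0]).zip
          ((codigo.map deltaB).zip codigo)).map
        (fun pdl => pvTabs (pdl.1 + min pdl.2.1 0) ++ pdl.2.2))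
  rw [foldl_prefixes (codigo.map deltaB) [0] 0 rfl, fmtLoopA_eq_bodyAt]
  simp [bodyAt]
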